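-- pv_equiv track=rewrite | github.com/remicome/advent_of_code | 2022/17/__main__.py | get_periodicity
-- ===== SOURCE A (Python) =====
-- import itertools
-- import typing
--
-- def get_periodicity(heights: list, period: typing.Optional[int] = None) -> tuple:
--     """Get the start sequence and periodicity of the successive height increases."""
--     diff = [y - x for x, y in itertools.pairwise(heights)]
--
--     if period:
--         # Use a pre-computed period
--         periods = [period]
--     else:
--         periods = range(1 + len(diff) // 2)
--
--     for period in periods:
--         for start in range(1 + len(diff) // 2):
--             if diff[start + period :] == diff[start:-period]:
--                 return diff[:start], diff[start : start + period]
--     raise ValueError("No periodicity found")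
-- ===== SOURCE B (Python) =====
-- import typing
--
--
-- def get_periodicity(heights: list, period: typing.Optional[int] = None) -> tuple:
--     """Get the start sequence and periodicity of the successive height increases.
--
--     For each candidate period a single scan finds the last mismatch index,
--     whose successor is directly the minimal valid start (instead of comparing
--     a pair of slices for every candidate start).
--     """
--     diff = [b - a for a, b in zip(heights, heights[1:])]
--     n = len(diff)
--     half = n // 2
--     if period:
--         if period < 0:
--             raise ValueError("No periodicity found")
--         candidates = [period]
--     elif n == 0:
--         return [], []
--     else:
--         candidates = range(1, half + 1)
--     for p in candidates:
--         last_mismatch = -1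
--         for i in range(n - p):
--             if diff[i] != diff[i + p]:
--                 last_mismatch = i
--         start = last_mismatch + 1
--         if start <= half:
--             return diff[:start], diff[start : start + p]
--     raise ValueError("No periodicity found")
-- ===== Notes on version B (the rewrite author's own statement) =====
-- stated objective: alternative
-- what changed: Instead of comparing two slices for every (period, start) pair, B makes one scan per candidate period that records the last mismatch index, whose successor is directly the minimal valid start; B also validates an explicit period (raising on negative ones) and answers the empty diff sequence directly.
-- outside the precondition, e.g. on get_periodicity([0, 1, 2], -1): A returns ([], [1]), B raises ValueError
import Mathlib
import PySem

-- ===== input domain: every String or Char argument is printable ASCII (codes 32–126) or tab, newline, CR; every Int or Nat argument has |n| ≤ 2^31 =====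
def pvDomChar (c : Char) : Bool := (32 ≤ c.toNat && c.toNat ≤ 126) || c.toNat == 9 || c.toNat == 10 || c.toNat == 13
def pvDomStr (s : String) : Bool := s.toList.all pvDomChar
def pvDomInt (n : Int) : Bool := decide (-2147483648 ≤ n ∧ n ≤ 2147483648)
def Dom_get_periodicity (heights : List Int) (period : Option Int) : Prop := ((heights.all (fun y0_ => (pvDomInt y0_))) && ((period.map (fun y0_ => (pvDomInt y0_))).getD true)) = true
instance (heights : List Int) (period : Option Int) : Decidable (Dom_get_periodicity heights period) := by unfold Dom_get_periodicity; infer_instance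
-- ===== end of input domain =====

-- B changes the inner search: one scan per candidate period records the last mismatch index,
-- whose successor is the minimal valid start (no per-start slice comparisons); on a 'raise
-- ValueError' path (excluded by Pre_) both ports return ([], []).

-- ===== PORT A =====
-- inner loop: 'for start in range(1 + len(diff) // 2): if diff[start+period:] == diff[start:-period]: return …'
def gpInnerA (diff : List Int) (p : Int) : List Int → Option (List Int × List Int)
  | [] => none
  | s :: rest =>
      if PySem.List.slice diff (some (s + p)) none = PySem.List.slice diff (some s) (some (-p)) then
        some (PySem.List.slice diff none (some s), PySem.List.slice diff (some s) (some (s + p)))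
      else gpInnerA diff p rest

-- outer loop: 'for period in periods: …'
def gpOuterA (diff : List Int) : List Int → Option (List Int × List Int)
  | [] => none
  | p :: rest =>
      match gpInnerA diff p (PySem.List.pyRange 0 (1 + PySem.Int.floordiv (diff.length : Int) 2) 1) with
      | some r => some r
      | none => gpOuterA diff rest

def get_periodicity (heights : List Int) (period : Option Int) : List Int × List Int :=
  let diff := (heights.zip heights.tail).map fun q => q.2 - q.1
  let periods : List Int :=
    match period with
    | some p => if p ≠ 0 then [p] else PySem.List.pyRange 0 (1 + PySem.Int.floordiv (diff.length : Int) 2) 1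
    | none => PySem.List.pyRange 0 (1 + PySem.Int.floordiv (diff.length : Int) 2) 1
  -- 'raise ValueError("No periodicity found")' — excluded by Pre_; the port returns ([], []) there
  (gpOuterA diff periods).getD ([], [])

-- ===== PORT B =====
-- 'last_mismatch = -1; for i in range(n - p): if diff[i] != diff[i + p]: last_mismatch = i'
def gpLastMismatch (diff : List Int) (p : Int) : Int :=
  (PySem.List.pyRange 0 ((diff.length : Int) - p) 1).foldl
    (fun m i => if PySem.List.pyGetD diff i 0 ≠ PySem.List.pyGetD diff (i + p) 0 then i else m) (-1)

-- 'for p in candidates: …; start = last_mismatch + 1; if start <= half: return …'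
def gpLoopB (diff : List Int) (half : Int) : List Int → Option (List Int × List Int)
  | [] => none
  | p :: rest =>
      let start := gpLastMismatch diff p + 1
      if start ≤ half then
        some (PySem.List.slice diff none (some start),
              PySem.List.slice diff (some start) (some (start + p)))
      else gpLoopB diff half rest

def get_periodicity_alt (heights : List Int) (period : Option Int) : List Int × List Int :=
  let diff := (heights.zip heights.tail).map fun q => q.2 - q.1
  let n : Int := diff.length
  let half := PySem.Int.floordiv n 2
  match period with
  | some p =>
      if p ≠ 0 then
        if p < 0 then ([], [])  -- 'raise ValueError' — excluded by Pre_
        else (gpLoopB diff half [p]).getD ([], [])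
      else if n = 0 then ([], [])
      else (gpLoopB diff half (PySem.List.pyRange 1 (half + 1) 1)).getD ([], [])
  | none =>
      if n = 0 then ([], [])
      else (gpLoopB diff half (PySem.List.pyRange 1 (half + 1) 1)).getD ([], [])

-- ===== PRECONDITION & SPEC =====
def gpDiffP (heights : List Int) : List Int :=
  (heights.zip heights.tail).map fun q => q.2 - q.1

-- 'diff[s+p:] == diff[s:-p]' holds for start s and period p (p ≥ 1)
def gpOk (diff : List Int) (p s : Nat) : Bool :=
  (List.range (diff.length - p)).all fun i => decide (i < s) || (diff.getD i 0 == diff.getD (i + p) 0)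

-- some start in range(1 + len(diff)//2) works for period p
def gpFeasible (diff : List Int) (p : Nat) : Bool :=
  (List.range (diff.length / 2 + 1)).any fun s => gpOk diff p s

-- the exhaustive search over periods 0..len(diff)//2 succeeds
def gpSearchable (diff : List Int) : Bool :=
  diff.length == 0 || (List.range (diff.length / 2 + 1)).any fun q => decide (1 ≤ q) && gpFeasible diff q

-- Pre_ excludes (a) inputs on which A raises ValueError (no periodicity within the searched
-- bounds) and (b) explicit negative periods, where A's negative-index slicing happens to return
-- a value but B naturally raises ValueError.
def Pre_get_periodicity (heights : List Int) (period : Option Int) : Prop :=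
  match period with
  | some p => if p = 0 then gpSearchable (gpDiffP heights) = true
              else 0 < p ∧ gpFeasible (gpDiffP heights) p.toNat = true
  | none => gpSearchable (gpDiffP heights) = true

instance (heights : List Int) (period : Option Int) : Decidable (Pre_get_periodicity heights period) := by
  unfold Pre_get_periodicity; rcases period with _ | p <;> infer_instance

def pvWitness_get_periodicity : List Int × Option Int := ([0, 1, 2, 3], none)

def Spec_get_periodicity (heights : List Int) (period : Option Int) (out : List Int × List Int) : Prop := out = get_periodicity_alt heights period
instance (heights : List Int) (period : Option Int) (out : List Int × List Int) : Decidable (Spec_get_periodicity heights period out) := by unfold Spec_get_periodicity; infer_instance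

-- ===== CLAIM (what is proved, stated in full; the proofs are below) =====
def Claim_equal_get_periodicity : Prop := ∀ (heights : List Int) (period : Option Int), Dom_get_periodicity heights period → Pre_get_periodicity heights period → Spec_get_periodicity heights period (get_periodicity heights period)

-- ===== LEMMAS AND PROOFS =====

-- the pair of slices both programs return for start s and period p
def gpOut (diff : List Int) (p s : Int) : List Int × List Int :=
  (PySem.List.slice diff none (some s), PySem.List.slice diff (some s) (some (s + p)))

-- Nat-level recursion equal to B's last-mismatch scan
def gpLM (diff : List Int) (p : Nat) : Nat → Int
  | 0 => -1
  | m + 1 => if diff.getD m 0 ≠ diff.getD (m + p) 0 then (m : Int) else gpLM diff p m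

lemma getElem?_eq_some_getD (l : List Int) (i : Nat) (h : i < l.length) :
    l[i]? = some (l.getD i 0) := by
  rw [List.getElem?_eq_getElem h, List.getD_eq_getElem l 0 h]

lemma sliceEq_iff (diff : List Int) (a p : Nat) (hp : 1 ≤ p) :
    (PySem.List.slice diff (some ((a : Int) + (p : Int))) none =
      PySem.List.slice diff (some (a : Int)) (some (-(p : Int)))) ↔
    ∀ i, a ≤ i → i + p < diff.length → diff.getD i 0 = diff.getD (i + p) 0 := by
  have hcast : ((a : Int) + (p : Int)) = ((a + p : Nat) : Int) := by push_cast; ring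
  rw [hcast, PySem.List.slice_from_natCast]
  have hrhs : PySem.List.slice diff (some (a : Int)) (some (-(p : Int))) =
      List.take (diff.length - p - min a diff.length) (List.drop (min a diff.length) diff) := by
    simp only [PySem.List.slice, PySem.List.clampIdx_natCast,
      PySem.List.clampIdx_neg_natCast diff.length p (by omega)]
  rw [hrhs]
  set n := diff.length with hn
  by_cases han : a ≤ n
  · rw [min_eq_left han]
    constructor
    · intro h i hai hip
      have hj : i - a < n - p - a := by omega
      have this2 : (List.drop (a + p) diff)[i - a]? =
          (List.take (n - p - a) (List.drop a diff))[i - a]? := by rw [h]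
      rw [List.getElem?_take_of_lt hj, List.getElem?_drop, List.getElem?_drop] at this2
      rw [show a + p + (i - a) = i + p by omega, show a + (i - a) = i by omega] at this2
      rw [getElem?_eq_some_getD _ _ (by omega), getElem?_eq_some_getD _ _ (by omega)] at this2
      exact (Option.some.inj this2).symm
    · intro h
      apply List.ext_getElem?
      intro j
      by_cases hj : j < n - p - a
      · rw [List.getElem?_drop, List.getElem?_take_of_lt hj, List.getElem?_drop]
        rw [getElem?_eq_some_getD _ _ (by omega), getElem?_eq_some_getD _ _ (by omega)]
        rw [show a + p + j = a + j + p by omega]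
        exact congrArg some (h (a + j) (by omega) (by omega)).symm
      · rw [List.getElem?_eq_none, List.getElem?_eq_none]
        · simp only [List.length_take, List.length_drop]; omega
        · simp only [List.length_drop]; omega
  · have h1 : List.drop (a + p) diff = [] := List.drop_eq_nil_of_le (by omega)
    rw [min_eq_right (by omega), h1]
    have h2 : List.drop n diff = [] := List.drop_eq_nil_of_le (by omega)
    rw [h2]
    simp only [List.take_nil, true_iff]
    intro i hai hip; omega

lemma gpLM_neg_one_le (diff : List Int) (p : Nat) : ∀ m, -1 ≤ gpLM diff p m := by
  intro m; induction m with
  | zero => simp [gpLM]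
  | succ m ih => simp only [gpLM]; split_ifs with h; · omega
                 · exact ih

lemma gpLM_lt_iff (diff : List Int) (p : Nat) : ∀ m (s : Nat),
    gpLM diff p m < (s : Int) ↔ ∀ i, i < m → s ≤ i → diff.getD i 0 = diff.getD (i + p) 0 := by
  intro m; induction m with
  | zero => intro s; simp [gpLM]; omega
  | succ m ih =>
      intro s
      simp only [gpLM]
      split_ifs with h
      · constructor
        · intro hms i hi hsi
          have : m < s := by exact_mod_cast hms
          omega
        · intro hall
          by_contra hms
          exact h (hall m (by omega) (by exact_mod_cast by omega : s ≤ m))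
      · rw [ih s]
        constructor
        · intro hall i hi hsi
          by_cases him : i = m
          · subst him; by_contra hne; exact h hne
          · exact hall i (by omega) hsi
        · intro hall i hi hsi; exact hall i (by omega) hsi

lemma foldl_range_gpLM (diff : List Int) (p : Nat) : ∀ m,
    (List.range m).foldl
      (fun acc i => if diff.getD i 0 ≠ diff.getD (i + p) 0 then (i : Int) else acc) (-1) =
    gpLM diff p m := by
  intro m; induction m with
  | zero => simp [gpLM]
  | succ m ih => rw [List.range_succ, List.foldl_append]; simp only [List.foldl_cons, List.foldl_nil, gpLM]
                 split_ifs with h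
                 · rfl
                 · exact ih

lemma gpLastMismatch_eq (diff : List Int) (p : Nat) (_hp : 1 ≤ p) :
    gpLastMismatch diff (p : Int) = gpLM diff p (diff.length - p) := by
  unfold gpLastMismatch
  by_cases hpn : p ≤ diff.length
  · rw [show ((diff.length : Int) - (p : Int)) = ((diff.length - p : Nat) : Int) by push_cast [hpn]; ring]
    rw [PySem.List.pyRange_zero_natCast, List.foldl_map]
    rw [← foldl_range_gpLM diff p (diff.length - p)]
    congr 1
    funext acc i
    rw [show ((i : Int) + (p : Int)) = ((i + p : Nat) : Int) by push_cast; ring]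
    simp only [PySem.List.pyGetD_natCast]
  · rw [show PySem.List.pyRange 0 ((diff.length : Int) - (p : Int)) 1 = [] by
      simp [PySem.List.pyRange]; omega]
    rw [show diff.length - p = 0 by omega]
    rfl

lemma cond_iff_lt (diff : List Int) (p a : Nat) (hp : 1 ≤ p) :
    (PySem.List.slice diff (some ((a : Int) + (p : Int))) none =
      PySem.List.slice diff (some (a : Int)) (some (-(p : Int)))) ↔
    gpLastMismatch diff (p : Int) < (a : Int) := by
  rw [sliceEq_iff diff a p hp, gpLastMismatch_eq diff p hp, gpLM_lt_iff]
  constructor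
  · intro h i h1 h2; exact h i h2 (by omega)
  · intro h i h1 h2; exact h i (by omega) h1

lemma innerA_from (diff : List Int) (p : Nat) (hp : 1 ≤ p) : ∀ (k a : Nat),
    (a : Int) ≤ gpLastMismatch diff (p : Int) + 1 →
    gpInnerA diff (p : Int) (PySem.List.pyRange (a : Int) ((a + k : Nat) : Int) 1) =
      (if gpLastMismatch diff (p : Int) + 1 < ((a + k : Nat) : Int) then
        some (gpOut diff (p : Int) (gpLastMismatch diff (p : Int) + 1))
      else none) := by
  intro k
  induction k with
  | zero =>
      intro a hS
      rw [show PySem.List.pyRange (a : Int) ((a + 0 : Nat) : Int) 1 = [] by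
        simp [PySem.List.pyRange]]
      rw [if_neg (by push_cast; omega)]
      rfl
  | succ k ih =>
      intro a hS
      rw [PySem.List.pyRange_one_cons (by push_cast; omega)]
      simp only [gpInnerA]
      by_cases hc : gpLastMismatch diff (p : Int) < (a : Int)
      · rw [if_pos ((cond_iff_lt diff p a hp).mpr hc)]
        have ha : (a : Int) = gpLastMismatch diff (p : Int) + 1 := by omega
        rw [if_pos (by push_cast; omega)]
        rw [gpOut, ← ha]
      · rw [if_neg (fun hEq => hc ((cond_iff_lt diff p a hp).mp hEq))]
        rw [show ((a : Int) + 1) = ((a + 1 : Nat) : Int) by push_cast; ring]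
        rw [show ((a + (k + 1) : Nat) : Int) = (((a + 1) + k : Nat) : Int) by push_cast; ring]
        exact ih (a + 1) (by push_cast; omega)

lemma innerA_zero (diff : List Int) : ∀ (k a : Nat), a + k ≤ diff.length →
    gpInnerA diff 0 (PySem.List.pyRange (a : Int) ((a + k : Nat) : Int) 1) = none := by
  intro k
  induction k with
  | zero =>
      intro a _
      rw [show PySem.List.pyRange (a : Int) ((a + 0 : Nat) : Int) 1 = [] by
        simp [PySem.List.pyRange]]
      rfl
  | succ k ih =>
      intro a hk
      rw [PySem.List.pyRange_one_cons (by push_cast; omega)]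
      simp only [gpInnerA]
      rw [if_neg]
      · rw [show ((a : Int) + 1) = ((a + 1 : Nat) : Int) by push_cast; ring]
        rw [show ((a + (k + 1) : Nat) : Int) = (((a + 1) + k : Nat) : Int) by push_cast; ring]
        exact ih (a + 1) (by omega)
      · intro hEq
        rw [add_zero, PySem.List.slice_from_natCast] at hEq
        rw [neg_zero] at hEq
        have hz : PySem.List.slice diff (some (a : Int)) (some 0) = [] := by
          simp only [PySem.List.slice, show ((0:Int)) = ((0:Nat):Int) by norm_num,
            PySem.List.clampIdx_natCast]
          simp
        rw [hz] at hEq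
        have : (List.drop a diff).length = diff.length - a := List.length_drop
        rw [hEq] at this
        simp only [List.length_nil] at this
        omega

lemma loopB_cons (diff : List Int) (half p : Int) (rest : List Int) :
    gpLoopB diff half (p :: rest) =
      if gpLastMismatch diff p + 1 ≤ half then
        some (gpOut diff p (gpLastMismatch diff p + 1))
      else gpLoopB diff half rest := rfl

lemma outer_eq (diff : List Int) : ∀ ps : List Int, (∀ p ∈ ps, 1 ≤ p) →
    gpOuterA diff ps = gpLoopB diff (PySem.Int.floordiv (diff.length : Int) 2) ps := by
  intro ps
  induction ps with
  | nil => intro _; rfl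
  | cons p rest ih =>
      intro hpos
      have hp1 : 1 ≤ p := hpos p (List.mem_cons_self ..)
      have hpe : p = ((p.toNat : Nat) : Int) := by omega
      have hfd : PySem.Int.floordiv (diff.length : Int) 2 = ((diff.length / 2 : Nat) : Int) := by
        exact_mod_cast PySem.Int.floordiv_natCast diff.length 2
      have hbound : 1 + PySem.Int.floordiv (diff.length : Int) 2 =
          (((0 + (diff.length / 2 + 1)) : Nat) : Int) := by rw [hfd]; push_cast; ring
      have hL0 : (0 : Int) ≤ gpLastMismatch diff p + 1 := by
        rw [hpe, gpLastMismatch_eq diff p.toNat (by omega)]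
        have := gpLM_neg_one_le diff p.toNat (diff.length - p.toNat)
        omega
      have hinner := innerA_from diff p.toNat (by omega) (diff.length / 2 + 1) 0
        (by rw [← hpe]; exact_mod_cast hL0)
      rw [show ((0 : Nat) : Int) = (0 : Int) by norm_num, ← hpe] at hinner
      simp only [gpOuterA, ← hbound] at hinner ⊢
      rw [hinner, loopB_cons]
      by_cases hcond : gpLastMismatch diff p + 1 ≤ PySem.Int.floordiv (diff.length : Int) 2
      · rw [if_pos (by rw [hbound, hfd] at *; push_cast at *; omega), if_pos hcond]
      · rw [if_neg (by rw [hbound, hfd] at *; push_cast at *; omega), if_neg hcond]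
        exact ih (fun q hq => hpos q (List.mem_cons_of_mem _ hq))

lemma main_none (diff : List Int) :
    (gpOuterA diff (PySem.List.pyRange 0 (1 + PySem.Int.floordiv (diff.length : Int) 2) 1)).getD ([], []) =
      (if ((diff.length : Int)) = 0 then ([], [])
       else (gpLoopB diff (PySem.Int.floordiv (diff.length : Int) 2)
         (PySem.List.pyRange 1 (PySem.Int.floordiv (diff.length : Int) 2 + 1) 1)).getD ([], [])) := by
  by_cases hn : diff.length = 0
  · have hd : diff = [] := List.eq_nil_of_length_eq_zero hn
    subst hd
    decide
  · rw [if_neg (by exact_mod_cast hn)]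
    have hfd : PySem.Int.floordiv (diff.length : Int) 2 = ((diff.length / 2 : Nat) : Int) := by
      exact_mod_cast PySem.Int.floordiv_natCast diff.length 2
    have hb : 1 + PySem.Int.floordiv (diff.length : Int) 2 = ((diff.length / 2 + 1 : Nat) : Int) := by
      rw [hfd]; push_cast; ring
    rw [hb, PySem.List.pyRange_one_cons (by push_cast; omega)]
    simp only [gpOuterA]
    have hz := innerA_zero diff (diff.length / 2 + 1) 0 (by omega)
    rw [show ((0 + (diff.length / 2 + 1) : Nat) : Int) = ((diff.length / 2 + 1 : Nat) : Int) by push_cast; ring,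
      show ((0 : Nat) : Int) = (0 : Int) by norm_num] at hz
    rw [← hb] at hz
    rw [hb] at hz ⊢
    rw [hz]
    rw [outer_eq diff _ (fun q hq => by
      have := PySem.List.mem_pyRange_one.mp hq
      omega)]
    rw [show ((0 : Int) + 1) = (1 : Int) by ring,
      show ((diff.length / 2 + 1 : Nat) : Int) = PySem.Int.floordiv (diff.length : Int) 2 + 1 by
        rw [hfd]; push_cast; ring]

-- ===== VERDICT (by name: the statement is the Claim_ definition above) =====
theorem get_periodicity_spec : Claim_equal_get_periodicity := by
  intro heights period hDom hPre
  unfold Spec_get_periodicity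
  unfold get_periodicity get_periodicity_alt
  rcases period with _ | p
  · simp only []
    exact (main_none _).symm ▸ rfl
  · simp only [Pre_get_periodicity] at hPre
    by_cases hp0 : p = 0
    · subst hp0
      simp only [ne_eq, not_true_eq_false, if_false]
      exact main_none _
    · rw [if_neg hp0] at hPre
      obtain ⟨hppos, _⟩ := hPre
      simp only [ne_eq, hp0, not_false_eq_true, if_true]
      rw [if_neg (by omega)]
      rw [outer_eq _ [p] (by intro q hq; simp at hq; omega)]
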